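-- pv_equiv track=rewrite | github.com/All-Hands-AI/openhands-aci | openhands_aci/editor/diff_editor.py | _fenced_match_but_for_leading_whitespace
-- ===== SOURCE A (Python) =====
-- def _fenced_match_but_for_leading_whitespace(
--     whole_lines: list[str], part_lines: list[str]
-- ) -> str | None:
--     """Checks if part_lines matches whole_lines ignoring consistent leading whitespace."""
--     num = len(whole_lines)
--     if len(part_lines) != num:
--         return None
--
--     # Check if the content matches after stripping leading whitespace
--     if not all(
--         whole_lines[i].lstrip() == part_lines[i].lstrip() for i in range(num)
--     ):
--         return None
--
--     # Check if the leading whitespace difference is consistent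
--     leading_diffs = set()
--     for i in range(num):
--         if whole_lines[i].strip():  # Only consider lines with content
--             whole_lead = whole_lines[i][
--                 : len(whole_lines[i]) - len(whole_lines[i].lstrip())
--             ]
--             part_lead = part_lines[i][
--                 : len(part_lines[i]) - len(part_lines[i].lstrip())
--             ]
--             # Ensure part line's leading whitespace is a prefix of whole line's
--             if not whole_lead.startswith(part_lead):
--                 return None
--             leading_diffs.add(whole_lead[len(part_lead) :])
--
--     if len(leading_diffs) > 1:
--         # Inconsistent leading whitespace difference
--         return None
--     elif len(leading_diffs) == 1:
--         # Consistent difference found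
--         return leading_diffs.pop()
--     else:
--         # No difference, or only whitespace lines
--         # Check if any part line had *more* whitespace than the whole line (invalid)
--         for i in range(num):
--             if whole_lines[i].strip():
--                 whole_lead_len = len(whole_lines[i]) - len(whole_lines[i].lstrip())
--                 part_lead_len = len(part_lines[i]) - len(part_lines[i].lstrip())
--                 if part_lead_len > whole_lead_len:
--                     return None
--         # If we passed the check above, it means the leading whitespace is identical or only differs on empty lines
--         return ''
-- ===== SOURCE B (Python) =====
-- def _fenced_match_but_for_leading_whitespace(whole_lines, part_lines):
--     # Single fused pass with a sentinel instead of A's three passes + diff set.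
--     if len(part_lines) != len(whole_lines):
--         return None
--     diff = None
--     for w, p in zip(whole_lines, part_lines):
--         w_lstrip = w.lstrip()
--         if w_lstrip != p.lstrip():
--             return None
--         if w.strip():
--             whole_lead = w[: len(w) - len(w_lstrip)]
--             part_lead = p[: len(p) - len(p.lstrip())]
--             if not whole_lead.startswith(part_lead):
--                 return None
--             d = whole_lead[len(part_lead):]
--             if diff is None:
--                 diff = d
--             elif diff != d:
--                 return None
--     return diff if diff is not None else ''
-- ===== Notes on version B (the rewrite author's own statement) =====
-- stated objective: simpler
-- what changed: Fuses A's three passes (upfront all-lines lstrip check, set-building loop over leading-whitespace diffs, three-way set-size branch with a second validation loop) into one zip loop that keeps a single Option sentinel for the diff and rejects on the first inconsistency.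
import Mathlib
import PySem

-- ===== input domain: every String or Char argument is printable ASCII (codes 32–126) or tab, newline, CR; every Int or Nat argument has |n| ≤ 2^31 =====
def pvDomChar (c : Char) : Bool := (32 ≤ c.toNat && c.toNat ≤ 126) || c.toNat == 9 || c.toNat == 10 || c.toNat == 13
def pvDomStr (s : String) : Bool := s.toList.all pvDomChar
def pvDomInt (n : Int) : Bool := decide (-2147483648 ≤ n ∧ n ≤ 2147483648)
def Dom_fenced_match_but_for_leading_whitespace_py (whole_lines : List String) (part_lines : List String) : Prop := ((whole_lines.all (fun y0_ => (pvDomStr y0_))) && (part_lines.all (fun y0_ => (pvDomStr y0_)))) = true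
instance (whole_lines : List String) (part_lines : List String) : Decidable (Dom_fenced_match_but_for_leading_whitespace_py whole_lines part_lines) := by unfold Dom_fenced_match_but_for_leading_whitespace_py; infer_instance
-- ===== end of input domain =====

-- B fuses A's three passes (all-lines lstrip check, diff-set building loop, set-size
-- branch + second validation loop) into one zip loop with an Option sentinel; same cost.

-- ===== PORT A =====
-- s[: len(s) - len(s.lstrip())]  (the leading-whitespace prefix of s, computed in both Pythons)
def pvLead (s : String) : String :=
  PySem.Str.slice s none (some (PySem.Str.len s - PySem.Str.len (PySem.Str.lstrip s)))

-- A's 'for i in range(num)' loops read whole_lines[i]/part_lines[i]; after the length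
-- guard they are ported exactly as structural recursion over the zipped lists.
-- A's set-building loop: none models the early 'return None', else the final set.
def pvA_buildDiffs : List (String × String) → PySem.Set String → Option (PySem.Set String)
  | [], s => some s
  | (w, p) :: rest, s =>
    if PySem.Str.strip w ≠ "" then
      let whole_lead := pvLead w
      let part_lead := pvLead p
      if ¬ PySem.Str.startswith whole_lead part_lead then none
      else pvA_buildDiffs rest
        (PySem.Set.add s (PySem.Str.slice whole_lead (some (PySem.Str.len part_lead)) none))
    else pvA_buildDiffs rest s

-- A's final loop in the empty-set branch
def pvA_checkMore : List (String × String) → Option String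
  | [] => some ""
  | (w, p) :: rest =>
    if PySem.Str.strip w ≠ "" then
      let whole_lead_len := PySem.Str.len w - PySem.Str.len (PySem.Str.lstrip w)
      let part_lead_len := PySem.Str.len p - PySem.Str.len (PySem.Str.lstrip p)
      if part_lead_len > whole_lead_len then none else pvA_checkMore rest
    else pvA_checkMore rest

def fenced_match_but_for_leading_whitespace_py (whole_lines : List String) (part_lines : List String) : Option String :=
  if part_lines.length ≠ whole_lines.length then none
  else if ¬ ((whole_lines.zip part_lines).all
      (fun wp => PySem.Str.lstrip wp.1 == PySem.Str.lstrip wp.2)) then none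
  else
    match pvA_buildDiffs (whole_lines.zip part_lines) PySem.Set.empty with
    | none => none
    | some leading_diffs =>
      if 1 < PySem.Set.len leading_diffs then none
      else if PySem.Set.len leading_diffs = 1 then
        some (leading_diffs.headD "")   -- set.pop(): exact here, the set has exactly one element
      else pvA_checkMore (whole_lines.zip part_lines)

-- ===== PORT B =====
-- Source B's single fused loop: sentinel diff : Option String instead of A's set
def pvB_loop : List (String × String) → Option String → Option String
  | [], diff => some (diff.getD "")
  | (w, p) :: rest, diff =>
    if PySem.Str.lstrip w ≠ PySem.Str.lstrip p then none
    else if PySem.Str.strip w ≠ "" then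
      let whole_lead := pvLead w
      let part_lead := pvLead p
      if ¬ PySem.Str.startswith whole_lead part_lead then none
      else
        let d := PySem.Str.slice whole_lead (some (PySem.Str.len part_lead)) none
        match diff with
        | none => pvB_loop rest (some d)
        | some d0 => if d0 ≠ d then none else pvB_loop rest diff
    else pvB_loop rest diff

def fenced_match_but_for_leading_whitespace_py_alt (whole_lines : List String) (part_lines : List String) : Option String :=
  if part_lines.length ≠ whole_lines.length then none
  else pvB_loop (whole_lines.zip part_lines) none

-- ===== PRECONDITION & SPEC =====
def Spec_fenced_match_but_for_leading_whitespace_py (whole_lines : List String) (part_lines : List String) (out : Option String) : Prop := out = fenced_match_but_for_leading_whitespace_py_alt whole_lines part_lines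
instance (whole_lines : List String) (part_lines : List String) (out : Option String) : Decidable (Spec_fenced_match_but_for_leading_whitespace_py whole_lines part_lines out) := by unfold Spec_fenced_match_but_for_leading_whitespace_py; infer_instance

-- ===== CLAIM (what is proved, stated in full; the proofs are below) =====
def Claim_equal_fenced_match_but_for_leading_whitespace_py : Prop := ∀ (whole_lines : List String) (part_lines : List String), Dom_fenced_match_but_for_leading_whitespace_py whole_lines part_lines → Spec_fenced_match_but_for_leading_whitespace_py whole_lines part_lines (fenced_match_but_for_leading_whitespace_py whole_lines part_lines)

-- ===== LEMMAS AND PROOFS =====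

-- A's post-processing of the diff set, with the empty-set branch already reduced to ''
def pvRhs (L : List (String × String)) (s : PySem.Set String) : Option String :=
  match pvA_buildDiffs L s with
  | none => none
  | some S => if 1 < S.length then none else if S.length = 1 then some (S.headD "") else some ""

-- B's sentinel state read as A's diff set
def pvSent : Option String → PySem.Set String
  | none => []
  | some x => [x]

theorem pvSent_none : pvSent none = [] := rfl

theorem pvSent_some (x : String) : pvSent (some x) = [x] := rfl

theorem pvSet_add_nil (d : String) : PySem.Set.add ([] : PySem.Set String) d = [d] := rfl

theorem pvSet_add_one_self (x : String) : PySem.Set.add [x] x = [x] := by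
  simp only [PySem.Set.add, PySem.Set.contains]
  rw [if_pos (by simp)]

theorem pvSet_add_one_ne (x d : String) (h : ¬ x = d) : PySem.Set.add [x] d = [x, d] := by
  simp only [PySem.Set.add, PySem.Set.contains]
  rw [if_neg (by simpa using Ne.symm h)]
  rfl

theorem pvSet_add_len {s : PySem.Set String} {d : String} :
    s.length ≤ (PySem.Set.add s d).length := by
  unfold PySem.Set.add
  split
  · exact le_refl _
  · simp

theorem pvA_buildDiffs_mono : ∀ (L : List (String × String)) (s S : PySem.Set String),
    pvA_buildDiffs L s = some S → s.length ≤ S.length := by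
  intro L
  induction L with
  | nil =>
    intro s S h
    simp only [pvA_buildDiffs, Option.some.injEq] at h
    simp [h]
  | cons wp rest ih =>
    intro s S h
    obtain ⟨w, p⟩ := wp
    simp only [pvA_buildDiffs] at h
    split at h
    · split at h
      · exact absurd h (by simp)
      · exact le_trans pvSet_add_len (ih _ _ h)
    · exact ih _ _ h

theorem pvRhs_big (L : List (String × String)) (s : PySem.Set String) (h : 2 ≤ s.length) :
    pvRhs L s = none := by
  unfold pvRhs
  cases hb : pvA_buildDiffs L s with
  | none => rfl
  | some S =>
    have := pvA_buildDiffs_mono L s S hb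
    simp only
    rw [if_pos (by omega)]

theorem pvA_buildDiffs_empty : ∀ (L : List (String × String)),
    pvA_buildDiffs L [] = some [] → ∀ wp ∈ L, PySem.Str.strip wp.1 = "" := by
  intro L
  induction L with
  | nil => intro _ wp h; simp at h
  | cons wp0 rest ih =>
    intro h wp hm
    obtain ⟨w, p⟩ := wp0
    simp only [pvA_buildDiffs] at h
    by_cases hc : PySem.Str.strip w ≠ ""
    · rw [if_pos hc] at h
      split at h
      · exact absurd h (by simp)
      · exfalso
        rw [pvSet_add_nil] at h
        have hmono := pvA_buildDiffs_mono _ _ _ h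
        rw [List.length_singleton, List.length_nil] at hmono
        omega
    · rw [if_neg hc] at h
      rw [not_not] at hc
      rcases List.mem_cons.mp hm with h1 | h2
      · subst h1; simpa using hc
      · exact ih h wp h2

theorem pvA_checkMore_trivial : ∀ (L : List (String × String)),
    (∀ wp ∈ L, PySem.Str.strip wp.1 = "") → pvA_checkMore L = some "" := by
  intro L
  induction L with
  | nil => intro _; rfl
  | cons wp rest ih =>
    intro h
    obtain ⟨w, p⟩ := wp
    simp only [pvA_checkMore]
    rw [if_neg (by simpa using h (w, p) (by simp))]
    exact ih (fun x hx => h x (List.mem_cons_of_mem _ hx))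

-- pvRhs one-step unfoldings
theorem pvRhs_cons_content {w p : String} (rest : List (String × String)) (s : PySem.Set String)
    (hc : PySem.Str.strip w ≠ "") (hsw : PySem.Str.startswith (pvLead w) (pvLead p) = true) :
    pvRhs ((w, p) :: rest) s =
      pvRhs rest (PySem.Set.add s (PySem.Str.slice (pvLead w) (some (PySem.Str.len (pvLead p))) none)) := by
  unfold pvRhs
  simp only [pvA_buildDiffs]
  rw [if_pos hc, if_neg (not_not_intro hsw)]

theorem pvRhs_cons_fail {w p : String} (rest : List (String × String)) (s : PySem.Set String)
    (hc : PySem.Str.strip w ≠ "") (hsw : ¬ PySem.Str.startswith (pvLead w) (pvLead p) = true) :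
    pvRhs ((w, p) :: rest) s = none := by
  unfold pvRhs
  simp only [pvA_buildDiffs]
  rw [if_pos hc, if_pos hsw]

theorem pvRhs_cons_ws {w p : String} (rest : List (String × String)) (s : PySem.Set String)
    (hc : ¬ PySem.Str.strip w ≠ "") :
    pvRhs ((w, p) :: rest) s = pvRhs rest s := by
  unfold pvRhs
  simp only [pvA_buildDiffs]
  rw [if_neg hc]

-- the main loop correspondence: B's sentinel state vs A's diff set
theorem pvMain : ∀ (L : List (String × String)) (x? : Option String),
    pvB_loop L x? =
      if ¬ (L.all (fun wp => PySem.Str.lstrip wp.1 == PySem.Str.lstrip wp.2)) = true then none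
      else pvRhs L (pvSent x?) := by
  intro L
  induction L with
  | nil =>
    intro x?
    cases x? <;> simp [pvB_loop, pvRhs, pvA_buildDiffs, pvSent]
  | cons wp rest ih =>
    intro x?
    obtain ⟨w, p⟩ := wp
    cases x? with
    | none =>
      simp only [pvB_loop, List.all_cons]
      by_cases heq : PySem.Str.lstrip w = PySem.Str.lstrip p
      · rw [if_neg (not_not_intro heq)]
        by_cases hc : PySem.Str.strip w ≠ ""
        · rw [if_pos hc]
          by_cases hsw : PySem.Str.startswith (pvLead w) (pvLead p) = true
          · rw [if_neg (not_not_intro hsw), ih (some _), pvSent_some,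
              pvRhs_cons_content rest _ hc hsw, pvSent_none, pvSet_add_nil]
            exact if_congr (by simp [heq]) rfl rfl
          · rw [if_pos hsw, pvRhs_cons_fail rest _ hc hsw, ite_self]
        · rw [if_neg hc, ih none, pvRhs_cons_ws rest _ hc]
          exact if_congr (by simp [heq]) rfl rfl
      · rw [if_pos heq, if_pos (by simp [heq])]
    | some x =>
      simp only [pvB_loop, List.all_cons]
      by_cases heq : PySem.Str.lstrip w = PySem.Str.lstrip p
      · rw [if_neg (not_not_intro heq)]
        by_cases hc : PySem.Str.strip w ≠ ""
        · rw [if_pos hc]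
          by_cases hsw : PySem.Str.startswith (pvLead w) (pvLead p) = true
          · rw [if_neg (not_not_intro hsw), pvRhs_cons_content rest _ hc hsw, pvSent_some]
            by_cases hxd : x = PySem.Str.slice (pvLead w) (some (PySem.Str.len (pvLead p))) none
            · rw [if_neg (not_not_intro hxd), ih (some x), pvSent_some, ← hxd, pvSet_add_one_self]
              exact if_congr (by simp [heq]) rfl rfl
            · rw [if_pos hxd, pvSet_add_one_ne _ _ hxd,
                pvRhs_big rest _ (by rw [List.length_cons, List.length_singleton]), ite_self]
          · rw [if_pos hsw, pvRhs_cons_fail rest _ hc hsw, ite_self]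
        · rw [if_neg hc, ih (some x), pvRhs_cons_ws rest _ hc]
          exact if_congr (by simp [heq]) rfl rfl
      · rw [if_pos heq, if_pos (by simp [heq])]

theorem pvMain_none (L : List (String × String)) :
    pvB_loop L none =
      if ¬ (L.all (fun wp => PySem.Str.lstrip wp.1 == PySem.Str.lstrip wp.2)) = true then none
      else pvRhs L [] :=
  pvMain L none

theorem pvSet_len_lt_iff (S : PySem.Set String) : 1 < PySem.Set.len S ↔ 1 < S.length := by
  unfold PySem.Set.len; exact_mod_cast Iff.rfl

theorem pvSet_len_eq_iff (S : PySem.Set String) : PySem.Set.len S = 1 ↔ S.length = 1 := by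
  unfold PySem.Set.len; exact_mod_cast Iff.rfl

-- ===== VERDICT (by name: the statement is the Claim_ definition above) =====
theorem fenced_match_but_for_leading_whitespace_py_spec : Claim_equal_fenced_match_but_for_leading_whitespace_py := by
  intro whole_lines part_lines _
  unfold Spec_fenced_match_but_for_leading_whitespace_py
  unfold fenced_match_but_for_leading_whitespace_py fenced_match_but_for_leading_whitespace_py_alt
  by_cases hlen : part_lines.length ≠ whole_lines.length
  · rw [if_pos hlen, if_pos hlen]
  · rw [if_neg hlen, if_neg hlen, pvMain_none]
    by_cases hall : ((whole_lines.zip part_lines).all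
        (fun wp => PySem.Str.lstrip wp.1 == PySem.Str.lstrip wp.2)) = true
    · rw [if_neg (not_not_intro hall), if_neg (not_not_intro hall)]
      rw [show (PySem.Set.empty : PySem.Set String) = [] from rfl]
      unfold pvRhs
      cases hb : pvA_buildDiffs (whole_lines.zip part_lines) [] with
      | none => rfl
      | some S =>
        dsimp only
        by_cases h2 : 1 < S.length
        · rw [if_pos ((pvSet_len_lt_iff S).mpr h2), if_pos h2]
        · rw [if_neg (fun hc => h2 ((pvSet_len_lt_iff S).mp hc)), if_neg h2]
          by_cases h1 : S.length = 1
          · rw [if_pos ((pvSet_len_eq_iff S).mpr h1), if_pos h1]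
          · rw [if_neg (fun hc => h1 ((pvSet_len_eq_iff S).mp hc)), if_neg h1]
            have hS0 : S = [] := List.length_eq_zero_iff.mp (by omega)
            subst hS0
            exact pvA_checkMore_trivial _ (pvA_buildDiffs_empty _ hb)
    · rw [if_pos hall, if_pos hall]
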